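-- pv_equiv track=rewrite | github.com/matdoz/Entrance-Exam-CS-MSc | Dice.py | exercise2
-- ===== SOURCE A (Python) =====
-- def exercise2(trial):
--     count = 0
--     tmp_count = 0
--     for char in trial:
--         if char == '6':
--             if tmp_count > count:
--                 count = tmp_count
--             tmp_count = 0
--         else:
--             tmp_count += 1
--     return tmp_count if tmp_count > count else count
-- ===== SOURCE B (Python) =====
-- def exercise2(trial):
--     return max(len(run) for run in trial.split('6'))
-- ===== Notes on version B (the rewrite author's own statement) =====
-- stated objective: simpler
-- what changed: Replaces the running-counter loop that resets on each delimiter with splitting the string on '6' and taking the maximum segment length.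
import Mathlib
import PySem

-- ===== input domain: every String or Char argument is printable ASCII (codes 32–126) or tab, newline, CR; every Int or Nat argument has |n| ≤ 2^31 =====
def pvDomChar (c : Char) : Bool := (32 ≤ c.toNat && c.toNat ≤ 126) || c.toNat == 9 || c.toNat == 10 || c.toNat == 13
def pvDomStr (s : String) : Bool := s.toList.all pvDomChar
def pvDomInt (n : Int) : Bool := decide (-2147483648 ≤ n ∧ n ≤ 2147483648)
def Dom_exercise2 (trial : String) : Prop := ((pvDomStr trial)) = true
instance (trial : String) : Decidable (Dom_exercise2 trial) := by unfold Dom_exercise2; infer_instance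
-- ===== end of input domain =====

-- B computes the longest '6'-free run by splitting on '6' and taking the maximal piece length (simpler decomposition, same cost).


-- ===== PORT A =====
-- literal port of A's loop: state (count, tmp_count), reset on '6', final 'tmp if tmp > count else count'
def exercise2 (trial : String) : Int :=
  let st := trial.toList.foldl
    (fun (st : Int × Int) (char : Char) =>
      if char = '6' then ((if st.2 > st.1 then st.2 else st.1), 0)
      else (st.1, st.2 + 1))
    (0, 0)
  if st.2 > st.1 then st.2 else st.1

-- ===== PORT B =====
-- literal port of Source B: max(len(run) for run in trial.split('6'));
-- split('6') never yields an empty list, so the .getD 0 branch is a totality guard only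
def exercise2_alt (trial : String) : Int :=
  let lens := (PySem.Chars.splitOn trial.toList ['6']).map (fun r => (r.length : Int))
  (PySem.List.max? lens (fun x => x)).getD 0

-- ===== PRECONDITION & SPEC =====
def Spec_exercise2 (trial : String) (out : Int) : Prop := out = exercise2_alt trial
instance (trial : String) (out : Int) : Decidable (Spec_exercise2 trial out) := by unfold Spec_exercise2; infer_instance

-- ===== CLAIM (what is proved, stated in full; the proofs are below) =====
def Claim_equal_exercise2 : Prop := ∀ (trial : String), Dom_exercise2 trial → Spec_exercise2 trial (exercise2 trial)

-- ===== LEMMAS AND PROOFS =====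

-- prepend `pre` to the first piece of a split
def pvConsPre (pre : List Char) : List (List Char) → List (List Char)
  | [] => [pre]
  | h :: t => (pre ++ h) :: t

-- structural split on '6'
def pvSp : List Char → List (List Char)
  | [] => [[]]
  | c :: rest => if c = '6' then [] :: pvSp rest else pvConsPre [c] (pvSp rest)

lemma pvConsPre_ne_nil (pre : List Char) (ps : List (List Char)) : pvConsPre pre ps ≠ [] := by
  cases ps <;> simp [pvConsPre]

lemma pvSp_ne_nil (cs : List Char) : pvSp cs ≠ [] := by
  cases cs with
  | nil => simp [pvSp]
  | cons c rest =>
    simp only [pvSp]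
    split_ifs
    · simp
    · exact pvConsPre_ne_nil _ _

lemma pvConsPre_consPre (p q : List Char) (ps : List (List Char)) :
    pvConsPre p (pvConsPre q ps) = pvConsPre (p ++ q) ps := by
  cases ps <;> simp [pvConsPre]

lemma splitOn_go_eq_sp (fuel : Nat) : ∀ (l cur : List Char) (acc : List (List Char)),
    l.length ≤ fuel →
    PySem.Chars.splitOn.go ['6'] fuel l cur acc = acc.reverse ++ pvConsPre cur.reverse (pvSp l) := by
  induction fuel with
  | zero =>
    intro l cur acc h
    have : l = [] := List.length_eq_zero_iff.mp (Nat.le_zero.mp h)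
    subst this
    simp [PySem.Chars.splitOn.go, pvSp, pvConsPre]
  | succ f ih =>
    intro l cur acc h
    cases l with
    | nil => simp [PySem.Chars.splitOn.go, pvSp, pvConsPre]
    | cons c rest =>
      by_cases hc : c = '6'
      · subst hc
        have hp : List.isPrefixOf ['6'] ('6' :: rest) = true := by
          simp [List.isPrefixOf]
        rw [show PySem.Chars.splitOn.go ['6'] (f+1) ('6' :: rest) cur acc
              = PySem.Chars.splitOn.go ['6'] f rest [] (cur.reverse :: acc) by
            simp [PySem.Chars.splitOn.go, hp, List.drop]]
        rw [ih rest [] (cur.reverse :: acc) (by simpa using Nat.le_of_succ_le_succ h)]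
        simp only [pvSp, List.reverse_cons, List.reverse_nil]
        obtain ⟨h1, t1, hh⟩ : ∃ h1 t1, pvSp rest = h1 :: t1 := by
          cases hs : pvSp rest with
          | nil => exact absurd hs (pvSp_ne_nil rest)
          | cons a b => exact ⟨a, b, rfl⟩
        simp [hh, pvConsPre]
      · have hp : List.isPrefixOf ['6'] (c :: rest) = false := by
          simp only [List.isPrefixOf, Bool.and_eq_false_iff, beq_eq_false_iff_ne, ne_eq]
          exact Or.inl fun h => hc h.symm
        rw [show PySem.Chars.splitOn.go ['6'] (f+1) (c :: rest) cur acc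
              = PySem.Chars.splitOn.go ['6'] f rest (c :: cur) acc by
            simp [PySem.Chars.splitOn.go, hp]]
        rw [ih rest (c :: cur) acc (by simpa using Nat.le_of_succ_le_succ h)]
        simp only [pvSp, if_neg hc, List.reverse_cons]
        rw [pvConsPre_consPre]

lemma splitOn_eq_sp (cs : List Char) : PySem.Chars.splitOn cs ['6'] = pvSp cs := by
  rw [PySem.Chars.splitOn, splitOn_go_eq_sp (cs.length + 1) cs [] [] (by omega)]
  obtain ⟨h1, t1, hh⟩ : ∃ h1 t1, pvSp cs = h1 :: t1 := by
    cases hs : pvSp cs with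
    | nil => exact absurd hs (pvSp_ne_nil cs)
    | cons a b => exact ⟨a, b, rfl⟩
  simp [hh, pvConsPre]

-- max of segment lengths
def pvMaxR (ps : List (List Char)) : Int := ps.foldr (fun r acc => max (r.length : Int) acc) 0

lemma pvMaxR_nonneg (ps : List (List Char)) : 0 ≤ pvMaxR ps := by
  induction ps with
  | nil => simp [pvMaxR]
  | cons h t ih => simp only [pvMaxR, List.foldr] at *; omega

def pvHeadMax (tmp : Int) : List (List Char) → Int
  | [] => tmp
  | h :: t => max (tmp + (h.length : Int)) (pvMaxR t)

lemma loopA (cs : List Char) : ∀ (count tmp : Int), 0 ≤ count → 0 ≤ tmp →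
    (let st := cs.foldl
        (fun (st : Int × Int) (char : Char) =>
          if char = '6' then ((if st.2 > st.1 then st.2 else st.1), 0)
          else (st.1, st.2 + 1))
        (count, tmp)
     if st.2 > st.1 then st.2 else st.1)
    = max count (pvHeadMax tmp (pvSp cs)) := by
  induction cs with
  | nil =>
    intro count tmp hc ht
    simp only [List.foldl, pvSp, pvHeadMax, pvMaxR, List.foldr, List.length_nil,
      Nat.cast_zero]
    omega
  | cons c rest ih =>
    intro count tmp hc ht
    obtain ⟨h1, t1, hh⟩ : ∃ h1 t1, pvSp rest = h1 :: t1 := by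
      cases hs : pvSp rest with
      | nil => exact absurd hs (pvSp_ne_nil rest)
      | cons a b => exact ⟨a, b, rfl⟩
    by_cases hc6 : c = '6'
    · subst hc6
      simp only [List.foldl, if_true]
      rw [ih ((if tmp > count then tmp else count)) 0 (by omega) le_rfl]
      simp only [pvSp, if_true, pvHeadMax, hh, pvMaxR, List.foldr,
        List.length_nil, Nat.cast_zero]
      omega
    · simp only [List.foldl, if_neg hc6]
      rw [ih count (tmp + 1) hc (by omega)]
      simp only [pvSp, if_neg hc6, hh, pvConsPre, pvHeadMax, pvMaxR,
        List.singleton_append, List.length_cons]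
      push_cast
      omega

lemma foldl_max_eq (l : List Int) : ∀ (x : Int), 0 ≤ x →
    l.foldl max x = max x (l.foldr max 0) := by
  induction l with
  | nil => intro x hx; simp; omega
  | cons c t ih =>
    intro x hx
    simp only [List.foldl, List.foldr]
    rw [ih (max x c) (by omega)]
    omega

-- ===== VERDICT (by name: the statement is the Claim_ definition above) =====
theorem exercise2_spec : Claim_equal_exercise2 := by
  intro trial _
  unfold Spec_exercise2 exercise2 exercise2_alt
  rw [splitOn_eq_sp]
  obtain ⟨h1, t1, hh⟩ : ∃ h1 t1, pvSp trial.toList = h1 :: t1 := by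
    cases hs : pvSp trial.toList with
    | nil => exact absurd hs (pvSp_ne_nil trial.toList)
    | cons a b => exact ⟨a, b, rfl⟩
  rw [loopA trial.toList 0 0 le_rfl le_rfl]
  simp only [hh, pvHeadMax, List.map_cons, PySem.List.max?_id_cons, Option.getD_some]
  rw [foldl_max_eq _ _ (by positivity)]
  have h2 : (t1.map (fun r => (r.length : Int))).foldr max 0 = pvMaxR t1 := by
    simp [pvMaxR, List.foldr_map]
  have h3 := pvMaxR_nonneg t1
  rw [h2]
  omega
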